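-- pv_equiv track=rewrite | github.com/Lab-RoCoCo-Sapienza/context-matters | utils.py | get_verbose_scene_graph
-- ===== SOURCE A (Python) =====
-- from typing import Dict, Set, Optional
-- from collections import defaultdict
-- from collections import defaultdict
-- from typing import Dict
--
-- def get_verbose_scene_graph(graph: Dict) -> str:
--     """
--     Given a 3DSG, return a verbose description of the scene graph with meaningful information,
--     including room names, objects, and their descriptions.
--
--     :param graph: Dictionary containing the 3DSG
--     :return: String with the verbose scene graph
--     """
--
--     rooms = graph.get("room", {})
--     objects = graph.get("object", {})
--
--     # 1. Create a label for each room: always append "_roomId".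
--     room_id_to_label = {
--         r_id: f"{room_info.get('scene_category', 'UnnamedRoom')}_{r_id}"
--         for r_id, room_info in rooms.items()
--     }
--
--     # 2. Create a label for each object: always append "_objId".
--     obj_id_to_label = {
--         o_id: f"{obj_info.get('class_', 'UnnamedObject')}_{o_id}"
--         for o_id, obj_info in objects.items()
--     }
--
--     # 3. Group objects by their roomId.
--     room_to_objects = defaultdict(list)
--     for o_id, obj_info in objects.items():
--         r_id = obj_info.get('parent_room')
--         if r_id in rooms:
--             obj_label = obj_id_to_label[o_id]
--             obj_description = obj_info.get('description', 'No description available')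
--             room_to_objects[r_id].append(f"{obj_label} - {obj_description}")
--
--     # 4. Construct the output string.
--     lines = []
--     for r_id in rooms:
--         room_label = room_id_to_label[r_id]
--         objs_in_room = room_to_objects.get(r_id, ["No objects"])
--         objs_str = "\n  - " + "\n  - ".join(objs_in_room)
--         lines.append(f"{room_label}:\n{objs_str}")
--
--     # 5. Return the final string.
--     return "\n".join(lines)
-- ===== SOURCE B (Python) =====
-- def get_verbose_scene_graph(graph):
--     """
--     Verbose description of a 3DSG: one block per room, each listing the
--     objects whose parent_room is that room.
--     """
--     rooms = graph.get("room", {})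
--     objects = graph.get("object", {})
--     lines = []
--     for r_id, room_info in rooms.items():
--         entries = [
--             f"{info.get('class_', 'UnnamedObject')}_{o_id} - {info.get('description', 'No description available')}"
--             for o_id, info in objects.items()
--             if info.get('parent_room') == r_id
--         ] or ["No objects"]
--         lines.append(f"{room_info.get('scene_category', 'UnnamedRoom')}_{r_id}:\n\n  - " + "\n  - ".join(entries))
--     return "\n".join(lines)
-- ===== Notes on version B (the rewrite author's own statement) =====
-- stated objective: simpler
-- what changed: B drops A's three precomputed index dicts (room labels, object labels, defaultdict grouping) and instead emits rooms in one pass, collecting each room's object entries by a direct scan of the objects dict, with labels built inline. Pre_ only excludes association lists with duplicate room/object ids, which no Python dict can represent.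
import Mathlib
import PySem

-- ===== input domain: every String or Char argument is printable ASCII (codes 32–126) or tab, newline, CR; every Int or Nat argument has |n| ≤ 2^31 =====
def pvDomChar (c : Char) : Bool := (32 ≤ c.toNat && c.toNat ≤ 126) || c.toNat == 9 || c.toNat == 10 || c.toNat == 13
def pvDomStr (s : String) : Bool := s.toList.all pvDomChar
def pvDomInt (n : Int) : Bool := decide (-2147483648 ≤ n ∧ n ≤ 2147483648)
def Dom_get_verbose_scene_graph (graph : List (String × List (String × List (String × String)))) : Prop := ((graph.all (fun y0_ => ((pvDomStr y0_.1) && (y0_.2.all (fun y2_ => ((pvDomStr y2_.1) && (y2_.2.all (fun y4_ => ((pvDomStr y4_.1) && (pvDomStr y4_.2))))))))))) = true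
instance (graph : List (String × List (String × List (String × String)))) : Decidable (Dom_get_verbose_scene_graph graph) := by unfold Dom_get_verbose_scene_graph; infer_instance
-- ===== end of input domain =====

-- B drops A's three precomputed index dicts and emits rooms in one pass with a nested
-- scan of the objects dict per room (simpler decomposition; not faster).


-- dict.get(k) / dict.get(k, dflt) on an association list (first match = Python dict lookup)
def pvGet? {α : Type} (d : List (String × α)) (k : String) : Option α :=
  (d.find? (fun p => p.1 == k)).map (·.2)

def pvGetD {α : Type} (d : List (String × α)) (k : String) (dflt : α) : α :=
  (pvGet? d k).getD dflt

-- ===== PORT A =====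
def get_verbose_scene_graph (graph : List (String × List (String × List (String × String)))) : String :=
  let rooms := pvGetD graph "room" []
  let objects := pvGetD graph "object" []
  let room_id_to_label := rooms.map (fun r => (r.1, pvGetD r.2 "scene_category" "UnnamedRoom" ++ "_" ++ r.1))
  let obj_id_to_label := objects.map (fun o => (o.1, pvGetD o.2 "class_" "UnnamedObject" ++ "_" ++ o.1))
  let room_to_objects := objects.foldl (fun d o =>
      match pvGet? o.2 "parent_room" with
      | none => d
      | some rid =>
        if rooms.any (fun r => r.1 == rid) then
          d.modify rid [] (fun l => l ++ [pvGetD obj_id_to_label o.1 "" ++ " - " ++ pvGetD o.2 "description" "No description available"])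
        else d) PySem.Dict.empty
  let lines := rooms.foldl (fun acc r =>
      acc ++ [pvGetD room_id_to_label r.1 "" ++ ":\n" ++ ("\n  - " ++ PySem.Str.join "\n  - " (room_to_objects.getD r.1 ["No objects"]))]) []
  PySem.Str.join "\n" lines

-- ===== PORT B =====
def get_verbose_scene_graph_alt (graph : List (String × List (String × List (String × String)))) : String :=
  let rooms := pvGetD graph "room" []
  let objects := pvGetD graph "object" []
  PySem.Str.join "\n" (rooms.map (fun r =>
    let entries :=
      (objects.filter (fun o => pvGet? o.2 "parent_room" == some r.1)).map
        (fun o => pvGetD o.2 "class_" "UnnamedObject" ++ "_" ++ o.1 ++ " - " ++ pvGetD o.2 "description" "No description available")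
    let entries := if entries = [] then ["No objects"] else entries
    pvGetD r.2 "scene_category" "UnnamedRoom" ++ "_" ++ r.1 ++ ":\n\n  - " ++ PySem.Str.join "\n  - " entries))

-- ===== PRECONDITION & SPEC =====
-- Pre_ excludes association lists whose "room" or "object" table repeats an id: a Python
-- dict cannot hold duplicate keys (building it collapses them), so A's value there is a
-- representation artefact, not defined by the source.
def Pre_get_verbose_scene_graph (graph : List (String × List (String × List (String × String)))) : Prop :=
  ((((graph.find? (fun p => p.1 == "room")).map (·.2)).getD []).map Prod.fst).Nodup ∧
  ((((graph.find? (fun p => p.1 == "object")).map (·.2)).getD []).map Prod.fst).Nodup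
instance (graph : List (String × List (String × List (String × String)))) : Decidable (Pre_get_verbose_scene_graph graph) := by unfold Pre_get_verbose_scene_graph; infer_instance

def pvWitness_get_verbose_scene_graph : (List (String × List (String × List (String × String)))) :=
  [("room", [("kitchen", [("scene_category", "kitchen")])]),
   ("object", [("o1", [("class_", "chair"), ("parent_room", "kitchen")])])]

def Spec_get_verbose_scene_graph (graph : List (String × List (String × List (String × String)))) (out : String) : Prop := out = get_verbose_scene_graph_alt graph
instance (graph : List (String × List (String × List (String × String)))) (out : String) : Decidable (Spec_get_verbose_scene_graph graph out) := by unfold Spec_get_verbose_scene_graph; infer_instance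

-- ===== CLAIM (what is proved, stated in full; the proofs are below) =====
def Claim_equal_get_verbose_scene_graph : Prop := ∀ (graph : List (String × List (String × List (String × String)))), Dom_get_verbose_scene_graph graph → Pre_get_verbose_scene_graph graph → Spec_get_verbose_scene_graph graph (get_verbose_scene_graph graph)

-- ===== LEMMAS AND PROOFS =====

-- Looking up p.1 in the label table built from l returns p's own label (keys Nodup).
lemma pv_find_label {I : Type} (f : String × I → String) :
    ∀ (l : List (String × I)) (p : String × I), p ∈ l → (l.map Prod.fst).Nodup →
      (l.map (fun r => (r.1, f r))).find? (fun q => q.1 == p.1) = some (p.1, f p) := by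
  intro l
  induction l with
  | nil => intro p hp _; simp at hp
  | cons a t ih =>
    intro p hp hn
    rcases List.mem_cons.mp hp with h | h
    · subst h; simp
    · have hcons : (a.1 :: t.map Prod.fst).Nodup := by rw [List.map_cons] at hn; exact hn
      have hn' := List.nodup_cons.mp hcons
      have hp1 : p.1 ∈ t.map Prod.fst := List.mem_map.mpr ⟨p, h, rfl⟩
      have hne : (a.1 == p.1) = false := by
        simp only [beq_eq_false_iff_ne]; intro e; exact hn'.1 (e ▸ hp1)
      simp only [List.map_cons, List.find?_cons, hne]
      exact ih p h hn'.2

-- A's guarded grouping loop is the plain modify-append loop over the keyed sublist.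
lemma pv_fold_eq {α : Type} (key : α → Option String) (grd : String → Bool) (ent : α → String) :
    ∀ (objs : List α) (d : PySem.Dict String (List String)),
      objs.foldl (fun d o =>
          match key o with
          | none => d
          | some rid => if grd rid then d.modify rid [] (fun l => l ++ [ent o]) else d) d
      = (objs.filterMap (fun o =>
            match key o with
            | none => none
            | some rid => if grd rid then some (rid, ent o) else none)).foldl
          (fun d p => d.modify p.1 [] (fun x => x ++ [p.2])) d := by
  intro objs
  induction objs with
  | nil => intro d; rfl
  | cons o t ih =>
    intro d
    cases h : key o with
    | none => simp [List.foldl_cons, h, ih]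
    | some rid =>
      by_cases hg : grd rid = true
      · simp [List.foldl_cons, h, hg, ih]
      · simp only [Bool.not_eq_true] at hg
        simp [List.foldl_cons, h, hg, ih]

-- Key membership after the plain modify-append loop.
lemma pv_contains_fold (rid : String) :
    ∀ (l : List (String × String)) (d : PySem.Dict String (List String)),
      (l.foldl (fun d p => d.modify p.1 [] (fun x => x ++ [p.2])) d).contains rid
        = (d.contains rid || l.any (fun p => p.1 == rid)) := by
  intro l
  induction l with
  | nil => intro d; simp
  | cons p t ih =>
    intro d
    simp [List.foldl_cons, ih, PySem.Dict.contains_modify, List.any_cons,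
      Bool.or_assoc, Bool.or_left_comm, BEq.comm]

-- The keyed sublist restricted to a key the guard accepts is the direct filter of objs.
lemma pv_filter_keyed {α : Type} (key : α → Option String) (grd : String → Bool) (ent : α → String)
    (rid : String) (hg : grd rid = true) :
    ∀ (objs : List α),
      ((objs.filterMap (fun o =>
          match key o with
          | none => none
          | some r => if grd r then some (r, ent o) else none)).filter (fun p => p.1 == rid)).map (·.2)
      = (objs.filter (fun o => key o == some rid)).map ent := by
  intro objs
  induction objs with
  | nil => rfl
  | cons o t ih =>
    cases h : key o with
    | none => simp [h, ih]
    | some r =>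
      by_cases hr : r = rid
      · subst hr; simp [h, hg, ih]
      · have hb : (r == rid) = false := beq_eq_false_iff_ne.mpr hr
        by_cases hgr : grd r = true
        · simp [h, hgr, hb, ih]
        · simp only [Bool.not_eq_true] at hgr
          simp [h, hgr, hb, ih]

-- The value A reads back from the grouping dict, in B's form.
lemma pv_group_get (l : List (String × String)) (rid : String) :
    (l.foldl (fun d p => d.modify p.1 [] (fun x => x ++ [p.2])) PySem.Dict.empty).getD rid ["No objects"]
      = (if (l.filter (fun p => p.1 == rid)).map (·.2) = [] then ["No objects"]
         else (l.filter (fun p => p.1 == rid)).map (·.2)) := by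
  have h0 : (l.foldl (fun d p => d.modify p.1 [] (fun x => x ++ [p.2])) PySem.Dict.empty).getD rid []
      = (l.filter (fun p => p.1 == rid)).map (·.2) := by
    rw [PySem.Dict.getD_foldl_modify_append]
    simp [PySem.Dict.getD_empty]
  have hc : (l.foldl (fun d p => d.modify p.1 [] (fun x => x ++ [p.2])) PySem.Dict.empty).contains rid
      = l.any (fun p => p.1 == rid) := by
    rw [pv_contains_fold]
    simp [PySem.Dict.contains_empty]
  by_cases hL : (l.filter (fun p => p.1 == rid)).map (·.2) = []
  · have hf : l.filter (fun p => p.1 == rid) = [] := List.map_eq_nil_iff.mp hL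
    have hany : l.any (fun p => p.1 == rid) = false := by
      rw [List.any_eq_false]
      intro p hp
      have := List.filter_eq_nil_iff.mp hf p hp
      simpa using this
    rw [hL, if_pos rfl]
    exact PySem.Dict.getD_of_not_contains _ _ (by rw [hc, hany])
  · have hany : l.any (fun p => p.1 == rid) = true := by
      rcases List.exists_mem_of_ne_nil _ (fun h => hL (by rw [List.map_eq_nil_iff.mpr h])) with ⟨p, hp⟩
      have := List.mem_filter.mp hp
      exact List.any_eq_true.mpr ⟨p, this.1, this.2⟩
    have hcon : (l.foldl (fun d p => d.modify p.1 [] (fun x => x ++ [p.2])) PySem.Dict.empty).contains rid = true := by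
      rw [hc, hany]
    obtain ⟨v, hv⟩ : ∃ v, (l.foldl (fun d p => d.modify p.1 [] (fun x => x ++ [p.2])) PySem.Dict.empty).get? rid = some v := by
      cases h : (l.foldl (fun d p => d.modify p.1 [] (fun x => x ++ [p.2])) PySem.Dict.empty).get? rid with
      | none => rw [(PySem.Dict.get?_eq_none_iff_contains _ _).mp h] at hcon; exact absurd hcon (by simp)
      | some v => exact ⟨v, rfl⟩
    rw [if_neg hL, PySem.Dict.getD_of_get?_eq_some _ _ hv, ← h0,
      PySem.Dict.getD_of_get?_eq_some _ _ hv]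

-- ===== VERDICT (by name: the statement is the Claim_ definition above) =====
theorem get_verbose_scene_graph_spec : Claim_equal_get_verbose_scene_graph := by
  intro graph _ hPre
  unfold Spec_get_verbose_scene_graph
  have hR : ((pvGetD graph "room" ([] : List (String × List (String × String)))).map Prod.fst).Nodup := hPre.1
  have hO : ((pvGetD graph "object" ([] : List (String × List (String × String)))).map Prod.fst).Nodup := hPre.2
  simp only [get_verbose_scene_graph, get_verbose_scene_graph_alt]
  rw [PySem.List.foldl_append_singleton_eq_map, List.nil_append]
  congr 1
  apply List.map_congr_left
  intro r hr
  -- room label lookup = inline label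
  have hlbl : pvGetD ((pvGetD graph "room" []).map
        (fun r => (r.1, pvGetD r.2 "scene_category" "UnnamedRoom" ++ "_" ++ r.1))) r.1 ""
      = pvGetD r.2 "scene_category" "UnnamedRoom" ++ "_" ++ r.1 := by
    show ((((pvGetD graph "room" []).map
        (fun r => (r.1, pvGetD r.2 "scene_category" "UnnamedRoom" ++ "_" ++ r.1))).find?
          (fun p => p.1 == r.1)).map (·.2)).getD "" = _
    rw [pv_find_label (fun r => pvGetD r.2 "scene_category" "UnnamedRoom" ++ "_" ++ r.1)
      (pvGetD graph "room" []) r hr hR]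
    rfl
  rw [hlbl]
  -- the guard accepts r.1
  have hg : ((pvGetD graph "room" []).any (fun rr => rr.1 == r.1)) = true :=
    List.any_eq_true.mpr ⟨r, hr, by simp⟩
  -- grouping fold → keyed sublist fold → B's filtered entries
  rw [pv_fold_eq (fun o => pvGet? o.2 "parent_room")
      (fun rid => (pvGetD graph "room" []).any (fun rr => rr.1 == rid))
      (fun o => pvGetD ((pvGetD graph "object" []).map
          (fun o => (o.1, pvGetD o.2 "class_" "UnnamedObject" ++ "_" ++ o.1))) o.1 ""
        ++ " - " ++ pvGetD o.2 "description" "No description available")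
      (pvGetD graph "object" []) PySem.Dict.empty,
    pv_group_get,
    pv_filter_keyed (fun o => pvGet? o.2 "parent_room")
      (fun rid => (pvGetD graph "room" []).any (fun rr => rr.1 == rid))
      (fun o => pvGetD ((pvGetD graph "object" []).map
          (fun o => (o.1, pvGetD o.2 "class_" "UnnamedObject" ++ "_" ++ o.1))) o.1 ""
        ++ " - " ++ pvGetD o.2 "description" "No description available")
      r.1 hg (pvGetD graph "object" [])]
  -- A's object label lookup = B's inline label, on every object
  have hmap : ((pvGetD graph "object" []).filter
        (fun o => pvGet? o.2 "parent_room" == some r.1)).map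
        (fun o => pvGetD ((pvGetD graph "object" []).map
            (fun o => (o.1, pvGetD o.2 "class_" "UnnamedObject" ++ "_" ++ o.1))) o.1 ""
          ++ " - " ++ pvGetD o.2 "description" "No description available")
      = ((pvGetD graph "object" []).filter
        (fun o => pvGet? o.2 "parent_room" == some r.1)).map
        (fun o => pvGetD o.2 "class_" "UnnamedObject" ++ "_" ++ o.1
          ++ " - " ++ pvGetD o.2 "description" "No description available") := by
    apply List.map_congr_left
    intro o ho
    have hom : o ∈ pvGetD graph "object" [] := List.mem_of_mem_filter ho
    have hol : pvGetD ((pvGetD graph "object" []).map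
          (fun o => (o.1, pvGetD o.2 "class_" "UnnamedObject" ++ "_" ++ o.1))) o.1 ""
        = pvGetD o.2 "class_" "UnnamedObject" ++ "_" ++ o.1 := by
      show ((((pvGetD graph "object" []).map
          (fun o => (o.1, pvGetD o.2 "class_" "UnnamedObject" ++ "_" ++ o.1))).find?
            (fun p => p.1 == o.1)).map (·.2)).getD "" = _
      rw [pv_find_label (fun o => pvGetD o.2 "class_" "UnnamedObject" ++ "_" ++ o.1)
        (pvGetD graph "object" []) o hom hO]
      rfl
    rw [hol]
  rw [hmap]
  -- string reassociation: lbl ++ ":\n" ++ ("\n  - " ++ J) = lbl ++ ":\n\n  - " ++ J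
  simp only [← String.append_assoc]
  congr 1
  rw [String.append_assoc]
  rfl
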